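-- pv_equiv track=rewrite | github.com/BasavarajBankolli/Leetcode | 3954-maximum-balanced-shipments/3954-maximum-balanced-shipments.py | maxBalancedShipments
-- ===== SOURCE A (Python) =====
-- from typing import List
--
-- def maxBalancedShipments(w: List[int]) -> int:
--     cnt = 0
--     res = 0
--
--     mx = w[-1]
--     for i in range(len(w) - 1, -1, -1):
--         cnt += 1
--
--         if w[i] > mx and cnt >= 1:
--             res += 1
--             cnt = 1
--
--             mx = w[i-1] if i > 0 else w[0]
--
--         else:
--             mx = w[i]
--
--
--     return res
-- ===== SOURCE B (Python) =====
-- from typing import List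
--
-- def maxBalancedShipments(w: List[int]) -> int:
--     count = 0
--     mx = None  # max weight of the currently open shipment; None = no open shipment
--     for x in w:
--         if mx is not None and x < mx:
--             count += 1
--             mx = None
--         elif mx is None or x > mx:
--             mx = x
--     return count
-- ===== Notes on version B (the rewrite author's own statement) =====
-- stated objective: simpler
-- what changed: A scans the array backwards by index, peeking at the previous element and carrying a redundant cnt counter; B is the canonical forward greedy that keeps the running maximum of the open shipment (None when no shipment is open) and closes a shipment whenever the current weight drops below that maximum.
import Mathlib
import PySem

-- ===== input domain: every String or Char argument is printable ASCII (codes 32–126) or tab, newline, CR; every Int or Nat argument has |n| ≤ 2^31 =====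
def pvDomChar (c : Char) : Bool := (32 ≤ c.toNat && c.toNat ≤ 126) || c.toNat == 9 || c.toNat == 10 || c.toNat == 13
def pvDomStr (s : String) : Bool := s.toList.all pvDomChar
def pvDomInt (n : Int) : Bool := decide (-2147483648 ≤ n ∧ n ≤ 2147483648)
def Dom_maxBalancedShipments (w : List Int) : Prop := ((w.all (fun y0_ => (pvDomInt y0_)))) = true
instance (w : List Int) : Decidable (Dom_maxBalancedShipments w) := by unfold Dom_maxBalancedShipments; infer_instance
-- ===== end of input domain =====

-- B replaces A's backward indexed scan (with its previous-element peek and unused cnt counter) by the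
-- canonical forward greedy keeping the open shipment's running maximum; objective: simpler.

-- ===== PORT A =====
-- loop body of A; pyGetD is exact here: under Pre_ every index A reads is in range
def pvAStep (w : List Int) (st : Int × Int × Int) (i : Int) : Int × Int × Int :=
  if PySem.List.pyGetD w i 0 > st.2.2 ∧ st.1 + 1 ≥ 1 then
    (1, st.2.1 + 1, if i > 0 then PySem.List.pyGetD w (i - 1) 0 else PySem.List.pyGetD w 0 0)
  else
    (st.1 + 1, st.2.1, PySem.List.pyGetD w i 0)

def maxBalancedShipments (w : List Int) : Int :=
  ((PySem.List.pyRange ((w.length : Int) - 1) (-1) (-1)).foldl (pvAStep w)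
    (0, 0, PySem.List.pyGetD w (-1) 0)).2.1

-- ===== PORT B =====
-- loop body of B: state = (count, running max of the open shipment; none = no open shipment)
def pvBStep (st : Int × Option Int) (x : Int) : Int × Option Int :=
  if (match st.2 with | some m => decide (x < m) | none => false) then (st.1 + 1, none)
  else if (match st.2 with | some m => decide (x > m) | none => true) then (st.1, some x)
  else st

def maxBalancedShipments_alt (w : List Int) : Int :=
  (w.foldl pvBStep (0, none)).1

-- ===== PRECONDITION & SPEC =====
-- Pre_ excludes only the empty list, on which A raises IndexError reading the last element.
def Pre_maxBalancedShipments (w : List Int) : Prop := w ≠ []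
instance (w : List Int) : Decidable (Pre_maxBalancedShipments w) := by
  unfold Pre_maxBalancedShipments; infer_instance

def pvWitness_maxBalancedShipments : List Int := [2, 5, 1, 3]

def Spec_maxBalancedShipments (w : List Int) (out : Int) : Prop := out = maxBalancedShipments_alt w
instance (w : List Int) (out : Int) : Decidable (Spec_maxBalancedShipments w out) := by
  unfold Spec_maxBalancedShipments; infer_instance

-- ===== CLAIM (what is proved, stated in full; the proofs are below) =====
def Claim_equal_maxBalancedShipments : Prop := ∀ (w : List Int), Dom_maxBalancedShipments w → Pre_maxBalancedShipments w → Spec_maxBalancedShipments w (maxBalancedShipments w)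


-- ===== LEMMAS AND PROOFS =====

-- "the head of the list is a hit": w[0] > w[1] and w[1] is not itself a hit
def pvHit : List Int → Bool
  | [] => false
  | [_] => false
  | a :: b :: rest => a > b && !pvHit (b :: rest)

-- B's loop as a recursion on the list
def hRun : Option Int → List Int → Int
  | _, [] => 0
  | none, x :: xs => hRun (some x) xs
  | some m, x :: xs =>
      if x < m then 1 + hRun none xs
      else if x > m then hRun (some x) xs
      else hRun (some m) xs

-- A's loop, read over w.reverse: close when t > previous element p, unless blocked
def gRun : Bool → Int → List Int → Int
  | _, _, [] => 0
  | b, p, t :: vs => if !b && decide (t > p) then 1 + gRun true t vs else gRun false t vs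

def gState : Bool → Int → List Int → Bool × Int
  | b, p, [] => (b, p)
  | b, p, t :: vs => if !b && decide (t > p) then gState true t vs else gState false t vs

theorem hRun_none_cons (x : Int) (xs : List Int) : hRun none (x :: xs) = hRun (some x) xs := rfl

theorem hRun_some_cons (m x : Int) (xs : List Int) :
    hRun (some m) (x :: xs)
      = if x < m then 1 + hRun none xs
        else if x > m then hRun (some x) xs else hRun (some m) xs := rfl

theorem hfold (xs : List Int) : ∀ (c : Int) (mo : Option Int),
    (xs.foldl pvBStep (c, mo)).1 = c + hRun mo xs := by
  induction xs with
  | nil => intro c mo; simp [hRun]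
  | cons x xs ih =>
    intro c mo
    cases mo with
    | none => simp [pvBStep, hRun, ih]
    | some m =>
      by_cases h1 : x < m
      · simp [pvBStep, hRun, h1, ih]; ring
      · by_cases h2 : x > m
        · simp [pvBStep, hRun, h1, h2, ih]
        · simp [pvBStep, hRun, h1, h2, ih]

theorem gRun_append (vs : List Int) : ∀ (b : Bool) (p : Int) (ys : List Int),
    gRun b p (vs ++ ys) = gRun b p vs + gRun (gState b p vs).1 (gState b p vs).2 ys := by
  induction vs with
  | nil => intro b p ys; simp [gRun, gState]
  | cons t vs ih =>
    intro b p ys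
    by_cases h : (!b && decide (t > p)) = true
    · simp [gRun, gState, h, ih]; ring
    · simp [gRun, gState, h, ih]

theorem gState_append (vs : List Int) : ∀ (b : Bool) (p : Int) (ys : List Int),
    gState b p (vs ++ ys) = gState (gState b p vs).1 (gState b p vs).2 ys := by
  induction vs with
  | nil => intro b p ys; simp [gState]
  | cons t vs ih =>
    intro b p ys
    by_cases h : (!b && decide (t > p)) = true
    · simp [gState, h, ih]
    · simp [gState, h, ih]

theorem hRun_some (rest : List Int) : ∀ (x m : Int),
    hRun (some m) (x :: rest)
      = hRun none (x :: rest) + (if x < m ∧ pvHit (x :: rest) = false then 1 else 0) := by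
  induction rest with
  | nil =>
    intro x m
    by_cases h1 : x < m
    · simp [hRun, pvHit, h1]
    · by_cases h2 : x > m
      · simp [hRun, pvHit, h1, h2]
      · simp [hRun, pvHit, h1, h2]
  | cons y rest ih =>
    intro x m
    have hyx := ih y x
    by_cases h1 : x < m
    · rw [hRun_some_cons m x (y :: rest), if_pos h1, hRun_none_cons x (y :: rest), hyx]
      have hP : pvHit (x :: y :: rest) = (decide (x > y) && !pvHit (y :: rest)) := by
        simp [pvHit]
      by_cases hb : y < x ∧ pvHit (y :: rest) = false
      · have hPt : pvHit (x :: y :: rest) = true := by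
          rw [hP]; simp [hb.2]; omega
        rw [if_pos hb, if_neg (by simp [hPt])]
        omega
      · have hPf : pvHit (x :: y :: rest) = false := by
          rw [hP]
          rcases not_and_or.mp hb with h | h
          · simp; intro h'; omega
          · simp at h; simp [h]
        rw [if_neg hb, if_pos ⟨h1, hPf⟩]
        omega
    · by_cases h2 : x > m
      · rw [hRun_some_cons, if_neg h1, if_pos h2, hRun_none_cons,
           if_neg (by intro h; omega)]
        omega
      · have hxm : m = x := by omega
        subst hxm
        rw [hRun_some_cons, if_neg h1, if_neg h2, hRun_none_cons,
           if_neg (by intro h; omega)]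
        omega

theorem pvMain (w : List Int) : ∀ (u : Int),
    gRun true 0 (w.reverse ++ [u]) = hRun (some u) w
      ∧ (gState true 0 (w.reverse ++ [u])).1 = pvHit (u :: w) := by
  induction w with
  | nil => intro u; simp [gRun, gState, hRun, pvHit]
  | cons x w ih =>
    intro u
    have hrev : (x :: w).reverse ++ [u] = (w.reverse ++ [x]) ++ [u] := by simp
    have hG := (ih x).1
    have hS := (ih x).2
    have hs2 : (gState true 0 (w.reverse ++ [x])).2 = x := by
      rw [gState_append]
      cases h : (gState true 0 w.reverse) with
      | mk b p => by_cases hc : (!b && decide (x > p)) = true <;> simp [gState, hc]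
    have hg1 : ∀ (b : Bool) (p t : Int),
        gRun b p [t] = if (!b && decide (t > p)) = true then 1 else 0 := by
      intro b p t
      by_cases hc : (!b && decide (t > p)) = true <;> simp [gRun, hc]
    have hst1 : ∀ (b : Bool) (p t : Int),
        (gState b p [t]).1 = (!b && decide (t > p)) := by
      intro b p t
      by_cases hc : (!b && decide (t > p)) = true <;> simp [gState, hc]
    constructor
    · rw [hrev, gRun_append, hs2, hG, hS, hg1, hRun_some_cons]
      by_cases hu : x < u
      · rw [if_pos hu]
        cases w with
        | nil => simp [hRun, pvHit]; omega
        | cons y w' =>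
          rw [hRun_some w' y x, hRun_none_cons]
          have hP : pvHit (x :: y :: w') = (decide (x > y) && !pvHit (y :: w')) := by
            simp [pvHit]
          by_cases hb : y < x ∧ pvHit (y :: w') = false
          · have hPt : pvHit (x :: y :: w') = true := by rw [hP]; simp [hb.2]; omega
            rw [if_pos hb, if_neg (by simp [hPt])]
            omega
          · have hPf : pvHit (x :: y :: w') = false := by
              rw [hP]
              rcases not_and_or.mp hb with h | h
              · simp; intro h'; omega
              · simp at h; simp [h]
            rw [if_neg hb, if_pos (by simp [hPf]; omega)]
            omega
      · by_cases h2 : x > u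
        · rw [if_neg hu, if_pos h2, if_neg (by simp; omega)]
          omega
        · have : u = x := by omega
          subst this
          rw [if_neg hu, if_neg h2, if_neg (by simp)]
          omega
    · rw [hrev, gState_append, hs2, hS, hst1]
      have : pvHit (u :: x :: w) = (decide (u > x) && !pvHit (x :: w)) := by simp [pvHit]
      rw [this, Bool.and_comm]

-- take (j+1) reversed, peeling the last taken element
theorem take_succ_reverse (w : List Int) (j : Nat) (h : j < w.length) :
    (w.take (j+1)).reverse = w[j] :: (w.take j).reverse := by
  rw [List.take_add_one]
  simp [List.getElem?_eq_getElem h]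

theorem Afold (w : List Int) : ∀ (j : Nat), j < w.length → ∀ (c r m : Int), 0 ≤ c →
    ((PySem.List.pyRange (j : Int) (-1) (-1)).foldl (pvAStep w) (c, r, m)).2.1
      = r + gRun false m ((w.take (j+1)).reverse) := by
  have hacc : ∀ (k : Nat) (hk : k < w.length), PySem.List.pyGetD w (k : Int) 0 = w[k] := by
    intro k hk
    rw [PySem.List.pyGetD_natCast, List.getD_eq_getElem w 0 hk]
  intro j
  induction j with
  | zero =>
    intro hj c r m hc
    rw [Nat.cast_zero, PySem.List.pyRange_neg_one_cons (by omega),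
       PySem.List.pyRange_neg_one_eq_nil (by omega)]
    rw [take_succ_reverse w 0 hj]
    rw [List.foldl_cons, List.foldl_nil]
    have h0 := hacc 0 hj
    rw [Nat.cast_zero] at h0
    unfold pvAStep
    by_cases h : w[0] > m
    · rw [if_pos (by rw [h0]; exact ⟨h, by omega⟩)]
      simp [gRun, h]
    · rw [if_neg (by rw [h0]; intro hh; exact h hh.1)]
      simp [gRun, h]
  | succ j ih =>
    intro hj c r m hc
    have hjlen : j < w.length := by omega
    have hcast : ((j + 1 : Nat) : Int) = (j : Int) + 1 := by push_cast; ring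
    have hm1 : ((j : Int) + 1 - 1) = ((j : Nat) : Int) := by ring
    rw [hcast, PySem.List.pyRange_neg_one_cons (by omega), hm1, List.foldl_cons]
    have hgj1 : PySem.List.pyGetD w ((j : Int) + 1) 0 = w[j+1] := by
      rw [← hcast, hacc (j+1) hj]
    have hgj : PySem.List.pyGetD w ((j : Int)) 0 = w[j] := hacc j hjlen
    rw [take_succ_reverse w (j+1) hj, take_succ_reverse w j hjlen]
    by_cases h : w[j+1] > m
    · have hstep : pvAStep w (c, r, m) ((j : Int) + 1) = (1, r + 1, w[j]) := by
        unfold pvAStep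
        rw [if_pos (by rw [hgj1]; exact ⟨h, by omega⟩)]
        rw [if_pos (by omega : (j : Int) + 1 > 0), hm1, hgj]
      rw [hstep, ih hjlen 1 (r+1) (w[j]) (by omega), take_succ_reverse w j hjlen]
      have e1 : gRun false m (w[j+1] :: w[j] :: (w.take j).reverse)
          = 1 + gRun false (w[j]) ((w.take j).reverse) := by
        simp only [gRun]
        rw [if_pos (by simp [h]), if_neg (by simp)]
      have e2 : gRun false (w[j]) (w[j] :: (w.take j).reverse)
          = gRun false (w[j]) ((w.take j).reverse) := by
        simp only [gRun]
        rw [if_neg (by simp)]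
      rw [e1, e2]
      ring
    · have hstep : pvAStep w (c, r, m) ((j : Int) + 1) = (c + 1, r, w[j+1]) := by
        unfold pvAStep
        rw [if_neg (by rw [hgj1]; intro hh; exact h hh.1), hgj1]
      rw [hstep, ih hjlen (c+1) r (w[j+1]) (by omega), take_succ_reverse w j hjlen]
      have e1 : gRun false m (w[j+1] :: w[j] :: (w.take j).reverse)
          = gRun false (w[j+1]) (w[j] :: (w.take j).reverse) := by
        simp only [gRun]
        rw [if_neg (by simp [h])]
      rw [e1]

-- ===== VERDICT (by name: the statement is the Claim_ definition above) =====
theorem maxBalancedShipments_spec : Claim_equal_maxBalancedShipments := by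
  unfold Claim_equal_maxBalancedShipments
  intro w _ hpre
  unfold Spec_maxBalancedShipments Pre_maxBalancedShipments at *
  have hlen : 0 < w.length := List.length_pos_iff.mpr hpre
  -- A side
  have hcast : ((w.length : Int) - 1) = ((w.length - 1 : Nat) : Int) := by
    push_cast [Nat.cast_sub hlen]; ring
  have hA : maxBalancedShipments w
      = gRun false (w.getLast hpre) (w.reverse) := by
    unfold maxBalancedShipments
    rw [hcast, Afold w (w.length - 1) (by omega) 0 0 _ le_rfl]
    rw [Nat.sub_add_cancel hlen, List.take_length, PySem.List.pyGetD_neg_one w 0 hpre]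
    ring
  -- B side
  have hB : maxBalancedShipments_alt w = hRun none w := by
    unfold maxBalancedShipments_alt
    rw [hfold]
    ring
  -- reverse decomposition
  have hrev : w.reverse = w[w.length - 1] :: (w.take (w.length - 1)).reverse := by
    have := take_succ_reverse w (w.length - 1) (by omega)
    rwa [Nat.sub_add_cancel hlen, List.take_length] at this
  have hlast : w.getLast hpre = w[w.length - 1] := List.getLast_eq_getElem hpre
  -- B through pvMain
  obtain ⟨x, w', rfl⟩ := List.exists_cons_of_ne_nil hpre
  have hBg : maxBalancedShipments_alt (x :: w') = gRun true 0 ((x :: w').reverse) := by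
    rw [hB, hRun_none_cons, ← (pvMain w' x).1]
    simp
  rw [hA, hBg, hrev, hlast]
  have eA : gRun false (x :: w')[(x :: w').length - 1]
        ((x :: w')[(x :: w').length - 1] :: ((x :: w').take ((x :: w').length - 1)).reverse)
      = gRun false (x :: w')[(x :: w').length - 1]
        (((x :: w').take ((x :: w').length - 1)).reverse) := by
    simp only [gRun]
    rw [if_neg (by simp)]
  have eB : gRun true 0
        ((x :: w')[(x :: w').length - 1] :: ((x :: w').take ((x :: w').length - 1)).reverse)
      = gRun false (x :: w')[(x :: w').length - 1]
        (((x :: w').take ((x :: w').length - 1)).reverse) := by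
    simp only [gRun]
    rw [if_neg (by simp)]
  rw [eA, eB]
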